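-- pv_equiv track=rewrite | github.com/dev-infinity101/MAYA-AI | backend/services/eligibility_service.py | _category_matches
-- ===== SOURCE A (Python) =====
-- from typing import Optional, Any
--
-- _CATEGORY_SYNONYMS: dict[str, list[str]] = {
--     "sc":               ["sc", "scheduled caste", "dalit"],
--     "st":               ["st", "scheduled tribe", "tribal", "adivasi"],
--     "obc":              ["obc", "other backward class", "backward class", "obc-creamy", "obc-non creamy"],
--     "backward class":   ["backward class", "bc", "obc", "other backward", "backward"],
--     "women":            ["women", "woman", "mahila", "female", "shg", "self help group"],
--     "minority":         ["minority", "muslim", "christian", "sikh", "buddhist", "jain", "parsi"],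
--     "ews":              ["ews", "economically weaker", "general-ews"],
--     "general":          ["general", "open", "unreserved"],
--     "ex-serviceman":    ["ex-serviceman", "ex serviceman", "veteran", "defence personnel", "ex-defence"],
--     "safai karamchari": [
--         "safai karamchari", "manual scavenger", "scavenger", "sanitation worker",
--         "liberated scavenger", "nskfdc",
--     ],
--     "vulnerable groups": [
--         "vulnerable", "pwd", "person with disability", "disabled", "transgender",
--         "orphan", "specially abled",
--     ],
-- }
--
-- def _accepts_all(scheme_cats: list[str]) -> bool:
--     return any(c.strip().lower() in ("all", "any", "n/a") for c in scheme_cats)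
--
-- def _category_matches(user_cat: Optional[str], scheme_cats: list[str]) -> bool:
--     """True if user's social category satisfies at least one scheme category."""
--     if not scheme_cats or _accepts_all(scheme_cats):
--         return True
--     user_lower = (user_cat or "general").lower()
--     for scheme_cat in scheme_cats:
--         sc_lower = scheme_cat.strip().lower()
--         if sc_lower in user_lower or user_lower in sc_lower:
--             return True
--         for synonyms in _CATEGORY_SYNONYMS.values():
--             if sc_lower in synonyms and any(s in user_lower for s in synonyms):
--                 return True
--     return False
-- ===== SOURCE B (Python) =====
-- from typing import Optional
--
-- _CATEGORY_SYNONYMS: dict[str, list[str]] = {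
--     "sc":               ["sc", "scheduled caste", "dalit"],
--     "st":               ["st", "scheduled tribe", "tribal", "adivasi"],
--     "obc":              ["obc", "other backward class", "backward class", "obc-creamy", "obc-non creamy"],
--     "backward class":   ["backward class", "bc", "obc", "other backward", "backward"],
--     "women":            ["women", "woman", "mahila", "female", "shg", "self help group"],
--     "minority":         ["minority", "muslim", "christian", "sikh", "buddhist", "jain", "parsi"],
--     "ews":              ["ews", "economically weaker", "general-ews"],
--     "general":          ["general", "open", "unreserved"],
--     "ex-serviceman":    ["ex-serviceman", "ex serviceman", "veteran", "defence personnel", "ex-defence"],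
--     "safai karamchari": [
--         "safai karamchari", "manual scavenger", "scavenger", "sanitation worker",
--         "liberated scavenger", "nskfdc",
--     ],
--     "vulnerable groups": [
--         "vulnerable", "pwd", "person with disability", "disabled", "transgender",
--         "orphan", "specially abled",
--     ],
-- }
--
-- # Reverse index, built once: each synonym phrase maps to the concatenation of
-- # every synonym group containing it, so the per-call nested scan disappears.
-- _REVERSE_INDEX: dict[str, list[str]] = {}
-- for _syns in _CATEGORY_SYNONYMS.values():
--     for _p in _syns:
--         _REVERSE_INDEX.setdefault(_p, []).extend(_syns)
--
--
-- def _category_matches(user_cat: Optional[str], scheme_cats: list[str]) -> bool: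
--     """True if user's social category satisfies at least one scheme category."""
--     if not scheme_cats or any(c.strip().lower() in ("all", "any", "n/a") for c in scheme_cats):
--         return True
--     user_lower = (user_cat or "general").lower()
--     for scheme_cat in scheme_cats:
--         sc_lower = scheme_cat.strip().lower()
--         if sc_lower in user_lower or user_lower in sc_lower:
--             return True
--         bucket = _REVERSE_INDEX.get(sc_lower)
--         if bucket is not None and any(s in user_lower for s in bucket):
--             return True
--     return False
-- ===== Notes on version B (the rewrite author's own statement) =====
-- stated objective: alternative
-- what changed: A's nested per-call scan over every synonym group is replaced by a module-level reverse index built once (each phrase maps to the concatenation of all groups containing it), so each scheme category does one dict lookup instead of scanning all groups.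
import Mathlib
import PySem

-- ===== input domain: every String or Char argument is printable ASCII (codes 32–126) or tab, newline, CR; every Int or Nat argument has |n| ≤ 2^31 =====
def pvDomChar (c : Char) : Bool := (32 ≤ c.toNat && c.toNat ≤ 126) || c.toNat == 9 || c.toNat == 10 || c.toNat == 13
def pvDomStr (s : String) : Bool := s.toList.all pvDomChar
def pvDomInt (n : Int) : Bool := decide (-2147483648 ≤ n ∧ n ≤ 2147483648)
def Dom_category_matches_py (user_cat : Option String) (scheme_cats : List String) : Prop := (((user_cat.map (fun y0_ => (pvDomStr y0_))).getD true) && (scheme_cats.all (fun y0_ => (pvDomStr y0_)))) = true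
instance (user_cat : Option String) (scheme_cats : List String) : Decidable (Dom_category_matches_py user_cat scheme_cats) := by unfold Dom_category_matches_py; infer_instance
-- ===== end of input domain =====

-- B replaces A's per-call nested scan over all synonym groups by a reverse index built
-- once at module level (phrase -> concatenation of every group containing it):
-- the nested group loop becomes one dict lookup per scheme category (alternative
-- structure; a timing run did not confirm a >=1.5x speedup).

-- ===== PORT A =====
def pvCategorySynonyms : PySem.Dict String (List String) :=
  PySem.Dict.ofList [
    ("sc",               ["sc", "scheduled caste", "dalit"]),
    ("st",               ["st", "scheduled tribe", "tribal", "adivasi"]),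
    ("obc",              ["obc", "other backward class", "backward class", "obc-creamy", "obc-non creamy"]),
    ("backward class",   ["backward class", "bc", "obc", "other backward", "backward"]),
    ("women",            ["women", "woman", "mahila", "female", "shg", "self help group"]),
    ("minority",         ["minority", "muslim", "christian", "sikh", "buddhist", "jain", "parsi"]),
    ("ews",              ["ews", "economically weaker", "general-ews"]),
    ("general",          ["general", "open", "unreserved"]),
    ("ex-serviceman",    ["ex-serviceman", "ex serviceman", "veteran", "defence personnel", "ex-defence"]),
    ("safai karamchari", ["safai karamchari", "manual scavenger", "scavenger", "sanitation worker",
                          "liberated scavenger", "nskfdc"]),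
    ("vulnerable groups", ["vulnerable", "pwd", "person with disability", "disabled", "transgender",
                          "orphan", "specially abled"])]

def pvAcceptsAllA (scheme_cats : List String) : Bool :=
  scheme_cats.any (fun c =>
    let s := PySem.Str.lower (PySem.Str.strip c)
    s == "all" || s == "any" || s == "n/a")

def category_matches_py (user_cat : Option String) (scheme_cats : List String) : Bool :=
  if scheme_cats.isEmpty || pvAcceptsAllA scheme_cats then true
  else
    -- (user_cat or "general"): None and "" are both falsy in Python
    let u := user_cat.getD ""
    let user := PySem.Str.lower (if u == "" then "general" else u)
    scheme_cats.any (fun scheme_cat =>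
      let sc := PySem.Str.lower (PySem.Str.strip scheme_cat)
      PySem.Str.isIn sc user || PySem.Str.isIn user sc ||
        (pvCategorySynonyms.values).any (fun synonyms =>
          synonyms.contains sc && synonyms.any (fun s => PySem.Str.isIn s user)))

-- ===== PORT B =====
-- (Source B re-declares the same module-level _CATEGORY_SYNONYMS literal; shared here as data)
-- _REVERSE_INDEX: setdefault(p, []).extend(syns) = d[p] = d.get(p, []) + syns
def pvReverseIndexB : PySem.Dict String (List String) :=
  pvCategorySynonyms.values.foldl
    (fun d syns => syns.foldl (fun d p => d.modify p [] (fun b => b ++ syns)) d)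
    PySem.Dict.empty

def category_matches_py_alt (user_cat : Option String) (scheme_cats : List String) : Bool :=
  if scheme_cats.isEmpty ||
      scheme_cats.any (fun c =>
        let s := PySem.Str.lower (PySem.Str.strip c)
        s == "all" || s == "any" || s == "n/a") then true
  else
    let u := user_cat.getD ""
    let user := PySem.Str.lower (if u == "" then "general" else u)
    scheme_cats.any (fun scheme_cat =>
      let sc := PySem.Str.lower (PySem.Str.strip scheme_cat)
      PySem.Str.isIn sc user || PySem.Str.isIn user sc ||
        (match pvReverseIndexB.get? sc with
         | none => false
         | some bucket => bucket.any (fun s => PySem.Str.isIn s user)))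

-- ===== PRECONDITION & SPEC =====
def Spec_category_matches_py (user_cat : Option String) (scheme_cats : List String) (out : Bool) : Prop := out = category_matches_py_alt user_cat scheme_cats
instance (user_cat : Option String) (scheme_cats : List String) (out : Bool) : Decidable (Spec_category_matches_py user_cat scheme_cats out) := by unfold Spec_category_matches_py; infer_instance

-- ===== CLAIM (what is proved, stated in full; the proofs are below) =====
def Claim_equal_category_matches_py : Prop := ∀ (user_cat : Option String) (scheme_cats : List String), Dom_category_matches_py user_cat scheme_cats → Spec_category_matches_py user_cat scheme_cats (category_matches_py user_cat scheme_cats)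

-- ===== LEMMAS AND PROOFS =====

-- one group's build pass: the bucket of sc gains g exactly when sc ∈ l
theorem pv_fold_group (user : String) (g : List String) :
    ∀ (l : List String) (d : PySem.Dict String (List String)) (sc : String),
      ((l.foldl (fun d p => d.modify p [] (fun b => b ++ g)) d).getD sc []).any
          (fun s => PySem.Str.isIn s user)
        = (((d.getD sc []).any (fun s => PySem.Str.isIn s user)) ||
            (l.contains sc && g.any (fun s => PySem.Str.isIn s user))) := by
  intro l
  induction l with
  | nil => intro d sc; simp
  | cons p l ih =>
    intro d sc
    simp only [List.foldl_cons]
    rw [ih]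
    by_cases h : sc = p
    · subst h
      rw [PySem.Dict.getD_modify_self]
      simp only [List.any_append, List.contains_cons, BEq.rfl, Bool.true_or, Bool.true_and]
      cases (d.getD sc []).any (fun s => PySem.Str.isIn s user) <;>
        cases g.any (fun s => PySem.Str.isIn s user) <;>
          cases l.contains sc <;> rfl
    · rw [PySem.Dict.getD_modify_of_ne _ _ _ h]
      simp [h]

-- whole build: looking up sc in the index and scanning its bucket equals
-- A's scan of every group containing sc
theorem pv_fold_groups (user : String) :
    ∀ (gs : List (List String)) (d : PySem.Dict String (List String)) (sc : String),
      ((gs.foldl (fun d syns => syns.foldl (fun d p => d.modify p [] (fun b => b ++ syns)) d) d).getD sc []).any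
          (fun s => PySem.Str.isIn s user)
        = (((d.getD sc []).any (fun s => PySem.Str.isIn s user)) ||
            gs.any (fun syns => syns.contains sc && syns.any (fun s => PySem.Str.isIn s user))) := by
  intro gs
  induction gs with
  | nil => intro d sc; simp
  | cons g gs ih =>
    intro d sc
    simp only [List.foldl_cons, List.any_cons]
    rw [ih, pv_fold_group]
    cases (d.getD sc []).any (fun s => PySem.Str.isIn s user) <;> simp

theorem pv_inner_eq (user sc : String) :
    (match pvReverseIndexB.get? sc with
     | none => false
     | some bucket => bucket.any (fun s => PySem.Str.isIn s user))
      = (pvCategorySynonyms.values).any (fun synonyms =>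
          synonyms.contains sc && synonyms.any (fun s => PySem.Str.isIn s user)) := by
  have hmatch : (match pvReverseIndexB.get? sc with
      | none => false
      | some bucket => bucket.any (fun s => PySem.Str.isIn s user))
      = (pvReverseIndexB.getD sc []).any (fun s => PySem.Str.isIn s user) := by
    rw [PySem.Dict.getD_eq_get?_getD]
    cases pvReverseIndexB.get? sc <;> rfl
  rw [hmatch]
  show ((pvCategorySynonyms.values.foldl _ PySem.Dict.empty).getD sc []).any _ = _
  rw [pv_fold_groups]
  simp only [PySem.Dict.getD_empty, List.any_nil, Bool.false_or]

-- ===== VERDICT (by name: the statement is the Claim_ definition above) =====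
theorem category_matches_py_spec : Claim_equal_category_matches_py := by
  intro user_cat scheme_cats _
  unfold Spec_category_matches_py category_matches_py category_matches_py_alt pvAcceptsAllA
  split_ifs with h
  · rfl
  · refine List.any_congr rfl (fun c => ?_)
    simp only []
    rw [pv_inner_eq]
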